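-- pv_equiv track=rewrite | github.com/XRoemer/Organon | source/py/importX.py | unescape_xml
-- ===== SOURCE A (Python) =====
-- def unescape_xml(term):
--     Zeichen = {
--                '_Leerzeichen_' : ' ',
--                '_KlammerAuf_' : '(',
--                '_KlammerZu_' : ')',
--                '_PuNkt_' : '.'}
--
--     for z in Zeichen:
--         term = term.replace(z, Zeichen[z])
--     return term
-- ===== SOURCE B (Python) =====
-- import re
--
-- _ZEICHEN = {
--     '_Leerzeichen_': ' ',
--     '_KlammerAuf_': '(',
--     '_KlammerZu_': ')',
--     '_PuNkt_': '.'}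
--
-- _RX = re.compile('|'.join(map(re.escape, _ZEICHEN)))
--
-- def unescape_xml(term):
--     return _RX.sub(lambda m: _ZEICHEN[m.group(0)], term)
-- ===== Notes on version B (the rewrite author's own statement) =====
-- stated objective: idiomatic
-- what changed: Replaced four sequential full-string replace() passes by one compiled regex alternation with a dict-lookup replacement function: a single left-to-right leftmost-match scan over the string.
-- outside the precondition, e.g. on unescape_xml('_KlammerAuf_Leerzeichen_'): A returns '_KlammerAuf ', B returns '(Leerzeichen_'; on unescape_xml('_PuNkt_KlammerAuf_'): A returns '_PuNkt(', B returns '.KlammerAuf_'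
import Mathlib
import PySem

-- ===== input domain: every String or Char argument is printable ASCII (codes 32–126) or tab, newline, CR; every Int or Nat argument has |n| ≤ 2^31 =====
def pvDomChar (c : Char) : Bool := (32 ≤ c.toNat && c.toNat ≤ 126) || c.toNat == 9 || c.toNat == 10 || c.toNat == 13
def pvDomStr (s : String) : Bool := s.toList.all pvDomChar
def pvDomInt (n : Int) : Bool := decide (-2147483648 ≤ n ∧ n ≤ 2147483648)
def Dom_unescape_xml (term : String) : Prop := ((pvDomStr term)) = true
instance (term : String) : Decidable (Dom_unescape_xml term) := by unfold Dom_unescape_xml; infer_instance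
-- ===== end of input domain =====

-- B replaces A's four sequential full-string replace() passes by one left-to-right leftmost-match
-- scan over the four escape tokens (Python: one compiled regex alternation + re.sub); equal outside
-- strings where two different tokens overlap on a shared underscore (excluded by Pre_).

-- ===== PORT A =====
def unescape_xml (term : String) : String :=
  -- Zeichen = {'_Leerzeichen_': ' ', '_KlammerAuf_': '(', '_KlammerZu_': ')', '_PuNkt_': '.'}
  let Zeichen : PySem.Dict String String :=
    ((((PySem.Dict.empty.insert "_Leerzeichen_" " ").insert "_KlammerAuf_" "(").insert
        "_KlammerZu_" ")").insert "_PuNkt_" ".")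
  -- for z in Zeichen: term = term.replace(z, Zeichen[z])   (z ranges over the keys, so Zeichen[z]
  -- never raises; getD is exact here)
  Zeichen.keys.foldl (fun t z => PySem.Str.replace t z (Zeichen.getD z "")) term

-- ===== PORT B =====
-- the four escape tokens, in the alternation (= dict insertion) order of Source B's pattern
def tok1 : List Char := ['_', 'L', 'e', 'e', 'r', 'z', 'e', 'i', 'c', 'h', 'e', 'n', '_']
def tok2 : List Char := ['_', 'K', 'l', 'a', 'm', 'm', 'e', 'r', 'A', 'u', 'f', '_']
def tok3 : List Char := ['_', 'K', 'l', 'a', 'm', 'm', 'e', 'r', 'Z', 'u', '_']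
def tok4 : List Char := ['_', 'P', 'u', 'N', 'k', 't', '_']

-- Source B does `_RX.sub(lambda m: _ZEICHEN[m.group(0)], term)` with the pattern
-- '_Leerzeichen_|_KlammerAuf_|_KlammerZu_|_PuNkt_'.  PySem has no regex; for this alternation of
-- plain literals re.sub IS exactly the following left-to-right scan (at each position the first
-- alternative that matches is substituted and the scan resumes after it) — ported by hand, exact.
def unescapeScan (s : List Char) : List Char :=
  match s with
  | [] => []
  | c :: t =>
    if tok1.isPrefixOf (c :: t) then ' ' :: unescapeScan ((c :: t).drop tok1.length)
    else if tok2.isPrefixOf (c :: t) then '(' :: unescapeScan ((c :: t).drop tok2.length)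
    else if tok3.isPrefixOf (c :: t) then ')' :: unescapeScan ((c :: t).drop tok3.length)
    else if tok4.isPrefixOf (c :: t) then '.' :: unescapeScan ((c :: t).drop tok4.length)
    else c :: unescapeScan t
termination_by s.length
decreasing_by all_goals (simp [tok1, tok2, tok3, tok4]; try omega)

def unescape_xml_alt (term : String) : String :=
  String.ofList (unescapeScan term.toList)

-- ===== PRECONDITION & SPEC =====
-- Pre_ excludes strings in which two DIFFERENT escape tokens overlap on a shared underscore with the
-- later dict key first (e.g. '_KlammerAuf_Leerzeichen_'): there A's fixed pass order and B's
-- leftmost-match rule are both defensible resolutions of the ambiguous overlap and they differ.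
def Pre_unescape_xml (term : String) : Prop :=
  PySem.Str.isIn "_KlammerAuf_Leerzeichen_" term = false ∧
  PySem.Str.isIn "_KlammerZu_Leerzeichen_" term = false ∧
  PySem.Str.isIn "_KlammerZu_KlammerAuf_" term = false ∧
  PySem.Str.isIn "_PuNkt_Leerzeichen_" term = false ∧
  PySem.Str.isIn "_PuNkt_KlammerAuf_" term = false ∧
  PySem.Str.isIn "_PuNkt_KlammerZu_" term = false
instance (term : String) : Decidable (Pre_unescape_xml term) := by
  unfold Pre_unescape_xml; infer_instance

def pvWitness_unescape_xml : String := "a_KlammerAuf_b _Leerzeichen_ _PuNkt_"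

def Spec_unescape_xml (term : String) (out : String) : Prop := out = unescape_xml_alt term
instance (term : String) (out : String) : Decidable (Spec_unescape_xml term out) := by
  unfold Spec_unescape_xml; infer_instance

-- ===== CLAIM (what is proved, stated in full; the proofs are below) =====
def Claim_equal_unescape_xml : Prop :=
  ∀ (term : String), Dom_unescape_xml term → Pre_unescape_xml term →
    Spec_unescape_xml term (unescape_xml term)

-- ===== LEMMAS AND PROOFS =====

-- Structural reformulation of PySem.Chars.replace (which runs on fuel with a reversed accumulator)
def pvRep (old new : List Char) (s : List Char) : List Char :=
  match s with
  | [] => []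
  | c :: t =>
    if old.isPrefixOf (c :: t) ∧ old ≠ [] then new ++ pvRep old new ((c :: t).drop old.length)
    else c :: pvRep old new t
termination_by s.length
decreasing_by
  · rename_i h
    simp only [List.length_drop, List.length_cons]
    have := List.length_pos_of_ne_nil h.2
    omega
  · simp

lemma pvRep_nil (old new : List Char) : pvRep old new [] = [] := by simp [pvRep]

lemma pvRep_pos (old new s : List Char) (ho : old ≠ []) (h : old <+: s) :
    pvRep old new s = new ++ pvRep old new (s.drop old.length) := by
  cases s with
  | nil => exact absurd (List.prefix_nil.mp h) ho
  | cons c t =>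
    rw [pvRep]
    simp [List.isPrefixOf_iff_prefix, h, ho]

lemma pvRep_neg (old new : List Char) (c : Char) (t : List Char) (h : ¬ old <+: (c :: t)) :
    pvRep old new (c :: t) = c :: pvRep old new t := by
  rw [pvRep]
  simp [List.isPrefixOf_iff_prefix, h]

lemma pvGo_eq (old new : List Char) (ho : old ≠ []) :
    ∀ (n fuel : Nat) (l acc : List Char), l.length ≤ n → l.length ≤ fuel →
      PySem.Chars.replace.go old new fuel l acc = acc.reverse ++ pvRep old new l := by
  intro n
  induction n with
  | zero =>
    intro fuel l acc h1 _
    have hl : l = [] := List.eq_nil_of_length_eq_zero (Nat.le_zero.mp h1)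
    subst hl
    cases fuel <;> simp [PySem.Chars.replace.go, pvRep_nil]
  | succ n ih =>
    intro fuel l acc h1 h2
    cases l with
    | nil => cases fuel <;> simp [PySem.Chars.replace.go, pvRep_nil]
    | cons c t =>
      cases fuel with
      | zero => simp at h2
      | succ f =>
        have hol : 0 < old.length := List.length_pos_of_ne_nil ho
        rw [PySem.Chars.replace.go]
        by_cases hp : old <+: (c :: t)
        · rw [if_pos (List.isPrefixOf_iff_prefix.mpr hp)]
          rw [ih f ((c :: t).drop old.length) (new.reverse ++ acc)
            (by simp only [List.length_drop, List.length_cons]; simp at h1; omega)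
            (by simp only [List.length_drop, List.length_cons]; simp at h2; omega)]
          rw [pvRep_pos old new _ ho hp]
          simp
        · rw [if_neg (by simpa [List.isPrefixOf_iff_prefix] using hp)]
          rw [ih f t (c :: acc) (by simp at h1; omega) (by simp at h2; omega)]
          rw [pvRep_neg old new c t hp]
          simp

lemma replace_eq_pvRep (old new s : List Char) (ho : old ≠ []) :
    PySem.Chars.replace s old new = pvRep old new s := by
  rw [PySem.Chars.replace]
  simp only [List.isEmpty_eq_false_iff.mpr ho]
  simpa using pvGo_eq old new ho s.length s.length s [] le_rfl le_rfl

-- a prefix of the replaced string that avoids the replacement char pulls back to the original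
lemma prefix_pullback (old : List Char) (rc : Char) (ho : old ≠ []) :
    ∀ (n : Nat) (s pat : List Char), s.length ≤ n → rc ∉ pat →
      pat <+: pvRep old [rc] s → pat <+: s := by
  intro n
  induction n with
  | zero =>
    intro s pat h1 _ hpre
    have hl : s = [] := List.eq_nil_of_length_eq_zero (Nat.le_zero.mp h1)
    subst hl
    simpa [pvRep_nil] using hpre
  | succ n ih =>
    intro s pat h1 hrc hpre
    cases s with
    | nil => simpa [pvRep_nil] using hpre
    | cons c t =>
      by_cases hp : old <+: (c :: t)
      · rw [pvRep_pos old [rc] _ ho hp] at hpre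
        cases pat with
        | nil => exact List.nil_prefix
        | cons p ps =>
          have := (List.cons_prefix_cons.mp hpre).1
          exact absurd (this ▸ List.mem_cons_self) hrc
      · rw [pvRep_neg old [rc] c t hp] at hpre
        cases pat with
        | nil => exact List.nil_prefix
        | cons p ps =>
          obtain ⟨hpc, hps⟩ := List.cons_prefix_cons.mp hpre
          have : ps <+: t :=
            ih t ps (by simp at h1; omega) (fun hm => hrc (List.mem_cons_of_mem _ hm)) hps
          exact List.cons_prefix_cons.mpr ⟨hpc, this⟩

-- a replace pass commutes past a block containing no occurrence of its token
lemma pvRep_append (old new : List Char) :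
    ∀ (p xs : List Char), (∀ j, j < p.length → ¬ old <+: (p ++ xs).drop j) →
      pvRep old new (p ++ xs) = p ++ pvRep old new xs := by
  intro p
  induction p with
  | nil => intro xs _; rfl
  | cons c p' ih =>
    intro xs hno
    have h0 : ¬ old <+: (c :: (p' ++ xs)) := by simpa using hno 0 (by simp)
    rw [List.cons_append, pvRep_neg old new _ _ h0,
      ih xs (fun j hj => by simpa using hno (j + 1) (by simp; omega))]
    simp

-- the six excluded overlap patterns, list level
def PreL (l : List Char) : Prop :=
  ¬ (tok2 ++ tok1.drop 1) <:+: l ∧ ¬ (tok3 ++ tok1.drop 1) <:+: l ∧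
  ¬ (tok3 ++ tok2.drop 1) <:+: l ∧ ¬ (tok4 ++ tok1.drop 1) <:+: l ∧
  ¬ (tok4 ++ tok2.drop 1) <:+: l ∧ ¬ (tok4 ++ tok3.drop 1) <:+: l

lemma PreL_mono {l l' : List Char} (h : l' <:+: l) (hp : PreL l) : PreL l' := by
  obtain ⟨h1, h2, h3, h4, h5, h6⟩ := hp
  exact ⟨fun h' => h1 (h'.trans h), fun h' => h2 (h'.trans h), fun h' => h3 (h'.trans h),
    fun h' => h4 (h'.trans h), fun h' => h5 (h'.trans h), fun h' => h6 (h'.trans h)⟩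


lemma not_prefix_of_head_ne {a b : Char} {u v : List Char} (h : a ≠ b) :
    ¬ (a :: u) <+: (b :: v) := fun hp => h (List.cons_prefix_cons.mp hp).1

-- tokX <+: '_' :: y  ↔  tokX.drop 1 <+: y   (each token starts with '_')
lemma tok_prefix_cons_underscore {tk : List Char} (htk : tk = '_' :: tk.drop 1) {y : List Char}
    (h : tk <+: '_' :: y) : tk.drop 1 <+: y := by
  rw [htk] at h
  exact (List.cons_prefix_cons.mp h).2

-- from  u <+: l'  conclude  (tk ++ u) <:+: tk ++ l'
lemma infix_of_tail_prefix {tk u l' : List Char} (h : u <+: l') :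
    (tk ++ u) <:+: tk ++ l' := by
  obtain ⟨r, rfl⟩ := h
  exact ((List.append_assoc tk u r) ▸ List.prefix_append (tk ++ u) r).isInfix

lemma mainAux :
    ∀ (n : Nat) (l : List Char), l.length ≤ n → PreL l →
      pvRep tok4 ['.'] (pvRep tok3 [')'] (pvRep tok2 ['('] (pvRep tok1 [' '] l)))
        = unescapeScan l := by
  intro n
  induction n with
  | zero =>
    intro l h1 _
    have hl : l = [] := List.eq_nil_of_length_eq_zero (Nat.le_zero.mp h1)
    subst hl
    simp [pvRep_nil, unescapeScan]
  | succ n ih =>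
    intro l hlen hP
    cases l with
    | nil => simp [pvRep_nil, unescapeScan]
    | cons c t =>
      by_cases h1 : tok1 <+: (c :: t)
      · -- leading '_Leerzeichen_'
        obtain ⟨l', hl⟩ := h1
        have hdrop : (c :: t).drop tok1.length = l' := by rw [← hl]; exact List.drop_left ..
        have hlen' : l'.length ≤ n := by
          have hlc := congrArg List.length hl
          simp [tok1] at hlc
          simp at hlen
          omega
        have hP' : PreL l' := PreL_mono (List.IsSuffix.isInfix ⟨tok1, hl⟩) hP
        rw [pvRep_pos tok1 [' '] _ (by decide) ⟨l', hl⟩, hdrop]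
        simp only [List.singleton_append]
        rw [pvRep_neg tok2 ['('] _ _ (not_prefix_of_head_ne (by decide))]
        rw [pvRep_neg tok3 [')'] _ _ (not_prefix_of_head_ne (by decide))]
        rw [pvRep_neg tok4 ['.'] _ _ (not_prefix_of_head_ne (by decide))]
        rw [unescapeScan]
        rw [if_pos (List.isPrefixOf_iff_prefix.mpr ⟨l', hl⟩), hdrop]
        exact congrArg (' ' :: ·) (ih l' hlen' hP')
      · by_cases h2 : tok2 <+: (c :: t)
        · -- leading '_KlammerAuf_'
          obtain ⟨l', hl⟩ := h2
          have hdrop : (c :: t).drop tok2.length = l' := by rw [← hl]; exact List.drop_left ..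
          have hlen' : l'.length ≤ n := by
            have hlc := congrArg List.length hl
            simp [tok2] at hlc
            simp at hlen
            omega
          have hP' : PreL l' := PreL_mono (List.IsSuffix.isInfix ⟨tok2, hl⟩) hP
          have hwin : ∀ j, j < tok2.length → ¬ tok1 <+: (tok2 ++ l').drop j := by
            intro j hj
            have hj' : j < 12 := by simpa [tok2] using hj
            interval_cases j
            all_goals try (simp [tok1, tok2, List.cons_prefix_cons]; done)
            intro hpre
            have h11 : (tok2 ++ l').drop 11 = '_' :: l' := by simp [tok2]
            have hp1 : tok1.drop 1 <+: l' := tok_prefix_cons_underscore rfl (h11 ▸ hpre)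
            exact hP.1 (hl ▸ infix_of_tail_prefix hp1)
          rw [unescapeScan]
          rw [if_neg (by simpa [List.isPrefixOf_iff_prefix] using h1),
            if_pos (List.isPrefixOf_iff_prefix.mpr ⟨l', hl⟩), hdrop]
          rw [show (c :: t : List Char) = tok2 ++ l' from hl.symm]
          rw [pvRep_append tok1 [' '] tok2 l' hwin]
          rw [pvRep_pos tok2 ['('] _ (by decide) (List.prefix_append _ _), List.drop_left]
          simp only [List.singleton_append]
          rw [pvRep_neg tok3 [')'] _ _ (not_prefix_of_head_ne (by decide))]
          rw [pvRep_neg tok4 ['.'] _ _ (not_prefix_of_head_ne (by decide))]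
          exact congrArg ('(' :: ·) (ih l' hlen' hP')
        · by_cases h3 : tok3 <+: (c :: t)
          · -- leading '_KlammerZu_'
            obtain ⟨l', hl⟩ := h3
            have hdrop : (c :: t).drop tok3.length = l' := by rw [← hl]; exact List.drop_left ..
            have hlen' : l'.length ≤ n := by
              have hlc := congrArg List.length hl
              simp [tok3] at hlc
              simp at hlen
              omega
            have hP' : PreL l' := PreL_mono (List.IsSuffix.isInfix ⟨tok3, hl⟩) hP
            have hwin1 : ∀ j, j < tok3.length → ¬ tok1 <+: (tok3 ++ l').drop j := by
              intro j hj
              have hj' : j < 11 := by simpa [tok3] using hj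
              interval_cases j
              all_goals try (simp [tok1, tok3, List.cons_prefix_cons]; done)
              intro hpre
              have h10 : (tok3 ++ l').drop 10 = '_' :: l' := by simp [tok3]
              have hp1 : tok1.drop 1 <+: l' := tok_prefix_cons_underscore rfl (h10 ▸ hpre)
              exact hP.2.1 (hl ▸ infix_of_tail_prefix hp1)
            have hwin2 : ∀ j, j < tok3.length →
                ¬ tok2 <+: (tok3 ++ pvRep tok1 [' '] l').drop j := by
              intro j hj
              have hj' : j < 11 := by simpa [tok3] using hj
              interval_cases j
              all_goals try (simp [tok2, tok3, List.cons_prefix_cons]; done)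
              intro hpre
              have h10 : (tok3 ++ pvRep tok1 [' '] l').drop 10
              = '_' :: pvRep tok1 [' '] l' := by simp [tok3]
              have hp1 : tok2.drop 1 <+: pvRep tok1 [' '] l' := tok_prefix_cons_underscore rfl (h10 ▸ hpre)
              have hp2 : tok2.drop 1 <+: l' := prefix_pullback tok1 ' ' (by decide) l'.length l' _ le_rfl (by decide) hp1
              exact hP.2.2.1 (hl ▸ infix_of_tail_prefix hp2)
            rw [unescapeScan]
            rw [if_neg (by simpa [List.isPrefixOf_iff_prefix] using h1),
              if_neg (by simpa [List.isPrefixOf_iff_prefix] using h2),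
              if_pos (List.isPrefixOf_iff_prefix.mpr ⟨l', hl⟩), hdrop]
            rw [show (c :: t : List Char) = tok3 ++ l' from hl.symm]
            rw [pvRep_append tok1 [' '] tok3 l' hwin1]
            rw [pvRep_append tok2 ['('] tok3 _ hwin2]
            rw [pvRep_pos tok3 [')'] _ (by decide) (List.prefix_append _ _), List.drop_left]
            simp only [List.singleton_append]
            rw [pvRep_neg tok4 ['.'] _ _ (not_prefix_of_head_ne (by decide))]
            exact congrArg (')' :: ·) (ih l' hlen' hP')
          · by_cases h4 : tok4 <+: (c :: t)
            · -- leading '_PuNkt_'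
              obtain ⟨l', hl⟩ := h4
              have hdrop : (c :: t).drop tok4.length = l' := by rw [← hl]; exact List.drop_left ..
              have hlen' : l'.length ≤ n := by
                have hlc := congrArg List.length hl
                simp [tok4] at hlc
                simp at hlen
                omega
              have hP' : PreL l' := PreL_mono (List.IsSuffix.isInfix ⟨tok4, hl⟩) hP
              have hwin1 : ∀ j, j < tok4.length → ¬ tok1 <+: (tok4 ++ l').drop j := by
                intro j hj
                have hj' : j < 7 := by simpa [tok4] using hj
                interval_cases j
                all_goals try (simp [tok1, tok4, List.cons_prefix_cons]; done)
                intro hpre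
                have h6 : (tok4 ++ l').drop 6 = '_' :: l' := by simp [tok4]
                have hp1 : tok1.drop 1 <+: l' := tok_prefix_cons_underscore rfl (h6 ▸ hpre)
                exact hP.2.2.2.1 (hl ▸ infix_of_tail_prefix hp1)
              have hwin2 : ∀ j, j < tok4.length →
                  ¬ tok2 <+: (tok4 ++ pvRep tok1 [' '] l').drop j := by
                intro j hj
                have hj' : j < 7 := by simpa [tok4] using hj
                interval_cases j
                all_goals try (simp [tok2, tok4, List.cons_prefix_cons]; done)
                intro hpre
                have h6 : (tok4 ++ pvRep tok1 [' '] l').drop 6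
                = '_' :: pvRep tok1 [' '] l' := by simp [tok4]
                have hp1 : tok2.drop 1 <+: pvRep tok1 [' '] l' := tok_prefix_cons_underscore rfl (h6 ▸ hpre)
                have hp2 : tok2.drop 1 <+: l' := prefix_pullback tok1 ' ' (by decide) l'.length l' _ le_rfl (by decide) hp1
                exact hP.2.2.2.2.1 (hl ▸ infix_of_tail_prefix hp2)
              have hwin3 : ∀ j, j < tok4.length →
                  ¬ tok3 <+: (tok4 ++ pvRep tok2 ['('] (pvRep tok1 [' '] l')).drop j := by
                intro j hj
                have hj' : j < 7 := by simpa [tok4] using hj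
                interval_cases j
                all_goals try (simp [tok3, tok4, List.cons_prefix_cons]; done)
                intro hpre
                have h6 : (tok4 ++ pvRep tok2 ['('] (pvRep tok1 [' '] l')).drop 6
                = '_' :: pvRep tok2 ['('] (pvRep tok1 [' '] l') := by simp [tok4]
                have hp1 : tok3.drop 1 <+: pvRep tok2 ['('] (pvRep tok1 [' '] l') := tok_prefix_cons_underscore rfl (h6 ▸ hpre)
                have hp2 : tok3.drop 1 <+: pvRep tok1 [' '] l' := prefix_pullback tok2 '(' (by decide) _ _ _ le_rfl (by decide) hp1
                have hp3 : tok3.drop 1 <+: l' := prefix_pullback tok1 ' ' (by decide) l'.length l' _ le_rfl (by decide) hp2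
                exact hP.2.2.2.2.2 (hl ▸ infix_of_tail_prefix hp3)
              rw [unescapeScan]
              rw [if_neg (by simpa [List.isPrefixOf_iff_prefix] using h1),
                if_neg (by simpa [List.isPrefixOf_iff_prefix] using h2),
                if_neg (by simpa [List.isPrefixOf_iff_prefix] using h3),
                if_pos (List.isPrefixOf_iff_prefix.mpr ⟨l', hl⟩), hdrop]
              rw [show (c :: t : List Char) = tok4 ++ l' from hl.symm]
              rw [pvRep_append tok1 [' '] tok4 l' hwin1]
              rw [pvRep_append tok2 ['('] tok4 _ hwin2]
              rw [pvRep_append tok3 [')'] tok4 _ hwin3]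
              rw [pvRep_pos tok4 ['.'] _ (by decide) (List.prefix_append _ _), List.drop_left]
              simp only [List.singleton_append]
              exact congrArg ('.' :: ·) (ih l' hlen' hP')
            · -- no token matches at this position
              have e1 : pvRep tok1 [' '] (c :: t) = c :: pvRep tok1 [' '] t :=
                pvRep_neg _ _ _ _ h1
              have n2 : ¬ tok2 <+: c :: pvRep tok1 [' '] t := by
                intro hpre
                exact h2 (prefix_pullback tok1 ' ' (by decide) (c :: t).length (c :: t) tok2
                  le_rfl (by decide) (by rw [e1]; exact hpre))
              have e2 : pvRep tok2 ['('] (c :: pvRep tok1 [' '] t)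
                  = c :: pvRep tok2 ['('] (pvRep tok1 [' '] t) := pvRep_neg _ _ _ _ n2
              have n3 : ¬ tok3 <+: c :: pvRep tok2 ['('] (pvRep tok1 [' '] t) := by
                intro hpre
                have hpre' : tok3 <+: pvRep tok2 ['('] (pvRep tok1 [' '] (c :: t)) := by
                  rw [e1, e2]; exact hpre
                have := prefix_pullback tok2 '(' (by decide) _ _ _ le_rfl (by decide) hpre'
                exact h3 (prefix_pullback tok1 ' ' (by decide) (c :: t).length (c :: t) tok3
                  le_rfl (by decide) this)
              have e3 : pvRep tok3 [')'] (c :: pvRep tok2 ['('] (pvRep tok1 [' '] t))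
                  = c :: pvRep tok3 [')'] (pvRep tok2 ['('] (pvRep tok1 [' '] t)) :=
                pvRep_neg _ _ _ _ n3
              have n4 : ¬ tok4 <+:
                  c :: pvRep tok3 [')'] (pvRep tok2 ['('] (pvRep tok1 [' '] t)) := by
                intro hpre
                have hpre' : tok4 <+:
                    pvRep tok3 [')'] (pvRep tok2 ['('] (pvRep tok1 [' '] (c :: t))) := by
                  rw [e1, e2, e3]; exact hpre
                have s3 := prefix_pullback tok3 ')' (by decide) _ _ _ le_rfl (by decide) hpre'
                have s2 := prefix_pullback tok2 '(' (by decide) _ _ _ le_rfl (by decide) s3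
                exact h4 (prefix_pullback tok1 ' ' (by decide) (c :: t).length (c :: t) tok4
                  le_rfl (by decide) s2)
              have e4 : pvRep tok4 ['.']
                    (c :: pvRep tok3 [')'] (pvRep tok2 ['('] (pvRep tok1 [' '] t)))
                  = c :: pvRep tok4 ['.']
                      (pvRep tok3 [')'] (pvRep tok2 ['('] (pvRep tok1 [' '] t))) :=
                pvRep_neg _ _ _ _ n4
              rw [e1, e2, e3, e4]
              rw [unescapeScan]
              rw [if_neg (by simpa [List.isPrefixOf_iff_prefix] using h1),
                if_neg (by simpa [List.isPrefixOf_iff_prefix] using h2),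
                if_neg (by simpa [List.isPrefixOf_iff_prefix] using h3),
                if_neg (by simpa [List.isPrefixOf_iff_prefix] using h4)]
              have hPt : PreL t := PreL_mono (List.IsSuffix.isInfix ⟨[c], rfl⟩) hP
              exact congrArg (c :: ·) (ih t (by simp at hlen; omega) hPt)

-- ===== VERDICT (by name: the statement is the Claim_ definition above) =====
theorem unescape_xml_spec : Claim_equal_unescape_xml := by
  intro term _ hPre
  unfold Spec_unescape_xml
  have key : ∀ (p : String) (pl : List Char), p.toList = pl →
      PySem.Str.isIn p term = false → ¬ pl <:+: term.toList := by
    intro p pl hpl hfalse hinf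
    rw [← hpl] at hinf
    rw [(PySem.Str.isIn_iff_infix p term).mpr hinf] at hfalse
    simp at hfalse
  have hPL : PreL term.toList :=
    ⟨key _ _ (by decide) hPre.1, key _ _ (by decide) hPre.2.1, key _ _ (by decide) hPre.2.2.1,
     key _ _ (by decide) hPre.2.2.2.1, key _ _ (by decide) hPre.2.2.2.2.1,
     key _ _ (by decide) hPre.2.2.2.2.2⟩
  have hA : unescape_xml term
      = PySem.Str.replace (PySem.Str.replace (PySem.Str.replace
          (PySem.Str.replace term "_Leerzeichen_" " ") "_KlammerAuf_" "(")
          "_KlammerZu_" ")") "_PuNkt_" "." := rfl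
  rw [hA]
  show String.ofList _ = _
  unfold unescape_xml_alt
  apply congrArg String.ofList
  have hb : ∀ (s o n : String), (PySem.Str.replace s o n).toList
      = PySem.Chars.replace s.toList o.toList n.toList := by
    intro s o n; simp [PySem.Str.replace]
  rw [hb, hb, hb]
  rw [show ("_Leerzeichen_" : String).toList = tok1 from by decide,
    show ("_KlammerAuf_" : String).toList = tok2 from by decide,
    show ("_KlammerZu_" : String).toList = tok3 from by decide,
    show ("_PuNkt_" : String).toList = tok4 from by decide,
    show (" " : String).toList = [' '] from by decide,
    show ("(" : String).toList = ['('] from by decide,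
    show (")" : String).toList = [')'] from by decide,
    show ("." : String).toList = ['.'] from by decide]
  rw [replace_eq_pvRep tok1 [' '] _ (by decide), replace_eq_pvRep tok2 ['('] _ (by decide),
    replace_eq_pvRep tok3 [')'] _ (by decide), replace_eq_pvRep tok4 ['.'] _ (by decide)]
  exact mainAux term.toList.length term.toList le_rfl hPL
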